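-- pv_equiv track=rewrite | github.com/matthewdholtkamp/testfile | scripts/build_atlas_chapter_from_synthesis.py | bounded_clause
-- ===== SOURCE A (Python) =====
-- def normalize(value):
--     return ' '.join((value or '').split()).strip()
--
-- def bounded_clause(rows):
--     caution = [row for row in rows if normalize(row.get('write_status')) == 'write_with_caution']
--     if not caution:
--         return 'The current write-now blocks are strong enough to carry the core chapter without heavy hedging.'
--     blocked = [row for row in caution if normalize(row.get('action_blockers'))]
--     if blocked:
--         return 'The bridge and downstream language should stay bounded until the remaining upgrade and deepening items are cleared.'
--     return 'Some rows still read as bounded support rather than fully assertive atlas prose.'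
-- ===== SOURCE B (Python) =====
-- def normalize(value):
--     return ' '.join((value or '').split()).strip()
--
-- _CLAUSES = [
--     'The current write-now blocks are strong enough to carry the core chapter without heavy hedging.',
--     'Some rows still read as bounded support rather than fully assertive atlas prose.',
--     'The bridge and downstream language should stay bounded until the remaining upgrade and deepening items are cleared.',
-- ]
--
-- def _severity(row):
--     if normalize(row.get('write_status')) != 'write_with_caution':
--         return 0
--     return 2 if normalize(row.get('action_blockers')) else 1
--
-- def bounded_clause(rows):
--     best = max((_severity(row) for row in rows), default=0)
--     return _CLAUSES[best]
-- ===== Notes on version B (the rewrite author's own statement) =====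
-- stated objective: alternative
-- what changed: Replaces A's staged filtered comprehensions and early-return chain by mapping each row to a numeric severity (0/1/2), taking the maximum, and indexing a clause table with it.
import Mathlib
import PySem

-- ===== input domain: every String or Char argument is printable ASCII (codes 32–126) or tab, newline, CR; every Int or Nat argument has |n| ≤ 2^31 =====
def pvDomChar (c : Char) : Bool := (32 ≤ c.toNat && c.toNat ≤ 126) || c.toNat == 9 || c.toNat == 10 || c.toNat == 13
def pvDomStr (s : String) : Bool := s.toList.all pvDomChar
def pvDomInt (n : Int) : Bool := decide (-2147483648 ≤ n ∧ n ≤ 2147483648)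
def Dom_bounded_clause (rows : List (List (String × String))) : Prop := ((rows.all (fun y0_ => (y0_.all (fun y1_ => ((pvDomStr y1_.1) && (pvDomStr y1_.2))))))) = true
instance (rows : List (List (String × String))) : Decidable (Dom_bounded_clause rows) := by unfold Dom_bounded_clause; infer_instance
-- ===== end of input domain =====

-- B maps each row to a numeric severity (0/1/2), takes the maximum and indexes a clause table,
-- instead of A's staged filtered lists with an early-return chain; return value only, no side effects.

-- ===== PORT A =====
-- row.get(k): first match in the association list (dict lookup), None -> ""
def pvRowGet (row : List (String × String)) (k : String) : String :=
  ((row.find? (fun p => p.1 == k)).map (·.2)).getD ""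

-- ' '.join((value or '').split()).strip()
def pvNormalize (value : String) : String :=
  PySem.Str.strip (PySem.Str.join " " (PySem.Str.split₀ value))

def bounded_clause (rows : List (List (String × String))) : String :=
  let caution := rows.filter (fun row => pvNormalize (pvRowGet row "write_status") == "write_with_caution")
  if caution.isEmpty then
    "The current write-now blocks are strong enough to carry the core chapter without heavy hedging."
  else
    let blocked := caution.filter (fun row => pvNormalize (pvRowGet row "action_blockers") != "")
    if !blocked.isEmpty then
      "The bridge and downstream language should stay bounded until the remaining upgrade and deepening items are cleared."
    else
      "Some rows still read as bounded support rather than fully assertive atlas prose."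

-- ===== PORT B =====
def pvClauses : List String :=
  [ "The current write-now blocks are strong enough to carry the core chapter without heavy hedging."
  , "Some rows still read as bounded support rather than fully assertive atlas prose."
  , "The bridge and downstream language should stay bounded until the remaining upgrade and deepening items are cleared." ]

def pvSeverity (row : List (String × String)) : Nat :=
  if pvNormalize (pvRowGet row "write_status") != "write_with_caution" then 0
  else if pvNormalize (pvRowGet row "action_blockers") != "" then 2 else 1

-- max(generator, default=0) ported as a left fold with max; _CLAUSES[best] as table lookup
-- (the index is always in range, so getD's default is never used)
def bounded_clause_alt (rows : List (List (String × String))) : String :=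
  pvClauses.getD (rows.foldl (fun m row => max m (pvSeverity row)) 0) ""

-- ===== PRECONDITION & SPEC =====
def Spec_bounded_clause (rows : List (List (String × String))) (out : String) : Prop := out = bounded_clause_alt rows
instance (rows : List (List (String × String))) (out : String) : Decidable (Spec_bounded_clause rows out) := by unfold Spec_bounded_clause; infer_instance

-- ===== CLAIM (what is proved, stated in full; the proofs are below) =====
def Claim_equal_bounded_clause : Prop := ∀ (rows : List (List (String × String))), Dom_bounded_clause rows → Spec_bounded_clause rows (bounded_clause rows)

-- ===== LEMMAS AND PROOFS =====

theorem pv_isEmpty_filter {a : Type} (p : a → Bool) (l : List a) :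
    (l.filter p).isEmpty = !l.any p := by
  induction l with
  | nil => rfl
  | cons x t ih => cases h : p x <;> simp [h, ih]

-- B's max-fold, characterised by which severities occur
theorem pv_fold_max (l : List (List (String × String))) (a : Nat) :
    l.foldl (fun m row => max m (pvSeverity row)) a =
      if l.any (fun r => pvSeverity r = 2) then max a 2
      else if l.any (fun r => pvSeverity r = 1) then max a 1
      else a := by
  induction l generalizing a with
  | nil => simp
  | cons r t ih =>
    have h3 : pvSeverity r = 0 ∨ pvSeverity r = 1 ∨ pvSeverity r = 2 := by
      unfold pvSeverity; split_ifs <;> simp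
    rcases h3 with h | h | h <;>
      simp [h, ih]

theorem pv_sev2 (r : List (String × String)) :
    (pvSeverity r = 2) ↔
      ((pvNormalize (pvRowGet r "write_status") == "write_with_caution") = true ∧
       (pvNormalize (pvRowGet r "action_blockers") != "") = true) := by
  unfold pvSeverity; split_ifs with h1 h2 <;> simp_all

theorem pv_sev1 (r : List (String × String)) :
    (pvSeverity r = 1) ↔
      ((pvNormalize (pvRowGet r "write_status") == "write_with_caution") = true ∧
       ¬ (pvNormalize (pvRowGet r "action_blockers") != "") = true) := by
  unfold pvSeverity; split_ifs with h1 h2 <;> simp_all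

-- ===== VERDICT (by name: the statement is the Claim_ definition above) =====
theorem bounded_clause_spec : Claim_equal_bounded_clause := by
  intro rows _
  show bounded_clause rows = bounded_clause_alt rows
  unfold bounded_clause bounded_clause_alt
  rw [pv_fold_max]
  simp only [pv_isEmpty_filter, List.filter_filter, Bool.not_not]
  by_cases h2 : rows.any (fun r => pvSeverity r = 2)
  · have hc : rows.any (fun row => pvNormalize (pvRowGet row "write_status") == "write_with_caution") = true := by
      rcases List.any_eq_true.mp h2 with ⟨r, hr, hs⟩
      exact List.any_eq_true.mpr ⟨r, hr, ((pv_sev2 r).mp (by simpa using hs)).1⟩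
    have hb : rows.any (fun a =>
        (pvNormalize (pvRowGet a "action_blockers") != "") &&
        (pvNormalize (pvRowGet a "write_status") == "write_with_caution")) = true := by
      rcases List.any_eq_true.mp h2 with ⟨r, hr, hs⟩
      have := (pv_sev2 r).mp (by simpa using hs)
      exact List.any_eq_true.mpr ⟨r, hr, by simp [this.1, this.2]⟩
    simp [h2, hc, hb, pvClauses]
  · by_cases h1 : rows.any (fun r => pvSeverity r = 1)
    · have hc : rows.any (fun row => pvNormalize (pvRowGet row "write_status") == "write_with_caution") = true := by
        rcases List.any_eq_true.mp h1 with ⟨r, hr, hs⟩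
        exact List.any_eq_true.mpr ⟨r, hr, ((pv_sev1 r).mp (by simpa using hs)).1⟩
      have hb : ¬ rows.any (fun a =>
          (pvNormalize (pvRowGet a "action_blockers") != "") &&
          (pvNormalize (pvRowGet a "write_status") == "write_with_caution")) = true := by
        intro hany
        rcases List.any_eq_true.mp hany with ⟨r, hr, hs⟩
        have hs' : (pvNormalize (pvRowGet r "action_blockers") != "") = true ∧
            (pvNormalize (pvRowGet r "write_status") == "write_with_caution") = true := by
          simpa using hs
        exact absurd (List.any_eq_true.mpr ⟨r, hr, by simp [(pv_sev2 r).mpr ⟨hs'.2, hs'.1⟩]⟩) h2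
      simp [h2, h1, hc, hb, pvClauses]
    · have hc : ¬ rows.any (fun row => pvNormalize (pvRowGet row "write_status") == "write_with_caution") = true := by
        intro hany
        rcases List.any_eq_true.mp hany with ⟨r, hr, hs⟩
        by_cases hbk : (pvNormalize (pvRowGet r "action_blockers") != "") = true
        · exact absurd (List.any_eq_true.mpr ⟨r, hr, by simp [(pv_sev2 r).mpr ⟨hs, hbk⟩]⟩) h2
        · exact absurd (List.any_eq_true.mpr ⟨r, hr, by simp [(pv_sev1 r).mpr ⟨hs, hbk⟩]⟩) h1
      simp [h2, h1, hc, pvClauses]
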